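-- pv_equiv track=rewrite | github.com/palakkhatri18/searching-and-sorting | Rope Cutting.py | RopeCutting
-- ===== SOURCE A (Python) =====
-- def RopeCutting (arr, n) :
--     #Complete the function\
--     arr.sort()
--     arr2=[]
--     current=arr[0]
--     j=0
--     while current != arr[n-1]:
--         if arr[j]-current>0:
--             arr2.append(n-j)
--             current=arr[j]
--         j=j+1
--     return arr2
-- ===== SOURCE B (Python) =====
-- def RopeCutting(arr, n):
--     # Frequency-dict re-implementation: sort in place (same observable mutation
--     # as the original), then walk the distinct lengths once, keeping a running
--     # prefix = number of ropes with strictly smaller length.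
--     arr.sort()
--     target = arr[n - 1]
--     freq = {}
--     for x in arr:
--         freq[x] = freq.get(x, 0) + 1
--     out = []
--     prefix = 0
--     for v, c in freq.items():
--         if v != arr[0] and v <= target:
--             out.append(n - prefix)
--         prefix += c
--     return out
-- ===== Notes on version B (the rewrite author's own statement) =====
-- stated objective: alternative
-- what changed: Replaces the index-walking while-loop that tracks a 'current' value with a frequency dictionary built in one pass and a single scan over the distinct sorted lengths using a running prefix count.
import Mathlib
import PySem

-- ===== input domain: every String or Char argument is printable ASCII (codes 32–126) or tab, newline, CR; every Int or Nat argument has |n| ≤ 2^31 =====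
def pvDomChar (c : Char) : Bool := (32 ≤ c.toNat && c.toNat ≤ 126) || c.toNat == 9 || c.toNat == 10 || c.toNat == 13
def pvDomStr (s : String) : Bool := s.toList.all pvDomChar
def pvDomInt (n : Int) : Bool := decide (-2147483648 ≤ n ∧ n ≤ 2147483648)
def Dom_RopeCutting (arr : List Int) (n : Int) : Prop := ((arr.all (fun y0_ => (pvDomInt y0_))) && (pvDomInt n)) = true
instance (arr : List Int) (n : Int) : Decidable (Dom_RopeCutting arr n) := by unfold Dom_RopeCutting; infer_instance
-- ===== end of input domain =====

-- B replaces A's index-walking scan with a frequency dictionary and a running prefix count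
-- (alternative decomposition, same asymptotic cost). Both Pythons sort `arr` in place; the
-- equivalence proved here is about the RETURN value (the mutation is identical anyway).

-- ===== PORT A =====
-- the while-loop of A: state (current, j, arr2); fuel only makes the recursion total,
-- it is never exhausted on inputs satisfying Pre_ (arr[j] lookup failing = IndexError, ditto)
def RopeCuttingLoop (s : List Int) (n t : Int) : Nat → Int → Nat → List Int → List Int
  | 0, _, _, arr2 => arr2
  | fuel+1, current, j, arr2 =>
    if current = t then arr2
    else
      match s[j]? with
      | none => arr2
      | some x =>
        if x - current > 0 then RopeCuttingLoop s n t fuel x (j+1) (arr2 ++ [n - (j : Int)])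
        else RopeCuttingLoop s n t fuel current (j+1) arr2

def RopeCutting (arr : List Int) (n : Int) : List Int :=
  let s := PySem.List.sorted arr (fun x => x) false
  match PySem.List.pyGet? s 0 with
  | none => []          -- IndexError (empty list): excluded by Pre_
  | some c0 =>
    match PySem.List.pyGet? s (n-1) with
    | none => []        -- IndexError: excluded by Pre_
    | some t => RopeCuttingLoop s n t (s.length+1) c0 0 []

-- ===== PORT B =====
def RopeCutting_alt (arr : List Int) (n : Int) : List Int :=
  let s := PySem.List.sorted arr (fun x => x) false
  match PySem.List.pyGet? s (n-1) with
  | none => []          -- IndexError: excluded by Pre_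
  | some target =>
    match PySem.List.pyGet? s 0 with
    | none => []        -- unreachable once arr[n-1] succeeded; guard for totality
    | some s0 =>
      let freq := s.foldl (fun d x => d.insert x (d.getD x 0 + 1)) PySem.Dict.empty
      (freq.items.foldl
        (fun (st : List Int × Int) vc =>
          (if vc.1 ≠ s0 ∧ vc.1 ≤ target then st.1 ++ [n - st.2] else st.1, st.2 + vc.2))
        ([], 0)).1

-- ===== PRECONDITION & SPEC =====
-- Pre_ excludes exactly the inputs where Python A raises IndexError (arr[0] on an empty
-- list, or arr[n-1] out of range); Python B raises on exactly the same inputs.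
def Pre_RopeCutting (arr : List Int) (n : Int) : Prop :=
  1 - (arr.length : Int) ≤ n ∧ n ≤ (arr.length : Int)
instance (arr : List Int) (n : Int) : Decidable (Pre_RopeCutting arr n) := by
  unfold Pre_RopeCutting; infer_instance

def pvWitness_RopeCutting : List Int × Int := ([5, 2, 2, 7, 5], 5)

def Spec_RopeCutting (arr : List Int) (n : Int) (out : List Int) : Prop := out = RopeCutting_alt arr n
instance (arr : List Int) (n : Int) (out : List Int) : Decidable (Spec_RopeCutting arr n out) := by
  unfold Spec_RopeCutting; infer_instance

-- ===== CLAIM (what is proved, stated in full; the proofs are below) =====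
def Claim_equal_RopeCutting : Prop := ∀ (arr : List Int) (n : Int),
  Dom_RopeCutting arr n → Pre_RopeCutting arr n → Spec_RopeCutting arr n (RopeCutting arr n)


-- ===== LEMMAS AND PROOFS =====

-- common normal form: for a sorted suffix r starting at absolute position p, emit n - (first
-- position) for each distinct value, up to and including the target t, then stop.
def emitSpec (t n : Int) : List Int → Int → List Int
  | [], _ => []
  | u :: r, p =>
      (n - p) ::
        (if u = t then []
         else emitSpec t n (r.dropWhile (fun x => x == u))
                (p + 1 + ((r.takeWhile (fun x => x == u)).length : Int)))
termination_by r _ => r.length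
decreasing_by
  simpa using Nat.lt_succ_of_le (List.length_dropWhile_le _ _)

-- B's distinct-keys loop, as a recursive function of the remaining (value, count) pairs
def bemit (s0 t n : Int) : List (Int × Int) → Int → List Int
  | [], _ => []
  | vc :: l, p => (if vc.1 ≠ s0 ∧ vc.1 ≤ t then [n - p] else []) ++ bemit s0 t n l (p + vc.2)

-- A's loop returns its accumulator as soon as current = t, whatever the fuel
theorem loop_exit (s : List Int) (n t : Int) (fuel j : Nat) (acc : List Int) :
    RopeCuttingLoop s n t fuel t j acc = acc := by
  cases fuel <;> simp [RopeCuttingLoop]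

theorem takeWhile_beq_replicate (u : Int) (l : List Int) :
    l.takeWhile (fun x => x == u) = List.replicate (l.takeWhile (fun x => x == u)).length u := by
  rw [List.eq_replicate_iff]
  exact ⟨rfl, fun b hb => by simpa using List.mem_takeWhile_imp hb⟩

-- in a sorted list whose elements are all ≥ u, everything after the leading block of u's is > u
theorem gt_of_mem_dropWhile (u : Int) (l : List Int) (hp : l.Pairwise (· ≤ ·))
    (hle : ∀ x ∈ l, u ≤ x) :
    ∀ x ∈ l.dropWhile (fun x => x == u), u < x := by
  intro x hx
  rcases hd : l.dropWhile (fun x => x == u) with _ | ⟨h, tl⟩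
  · simp [hd] at hx
  · have hsub : (l.dropWhile (fun x => x == u)).Sublist l := List.dropWhile_sublist _
    have hhl : h ∈ l := hsub.mem (by simp [hd])
    have hhne : h ≠ u := by
      have hw := List.head_dropWhile_not (fun x => x == u) (l := l) (by simp [hd])
      simp only [hd, List.head_cons, beq_eq_false_iff_ne, ne_eq] at hw
      exact hw
    have hhu : u < h := lt_of_le_of_ne (hle h hhl) (Ne.symm hhne)
    have hpd : (h :: tl).Pairwise (· ≤ ·) := hd ▸ (List.Pairwise.sublist hsub hp)
    rcases (by simpa [hd] using hx : x = h ∨ x ∈ tl) with rfl | hxtl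
    · exact hhu
    · exact lt_of_lt_of_le hhu ((List.pairwise_cons.mp hpd).1 x hxtl)

-- A's loop walks over a block of copies of its current value without emitting anything
theorem loop_skip (s : List Int) (n t : Int) :
    ∀ (k fuel j : Nat) (current : Int) (acc r : List Int),
      current ≠ t → s.drop j = List.replicate k current ++ r → k ≤ fuel →
      RopeCuttingLoop s n t fuel current j acc =
        RopeCuttingLoop s n t (fuel - k) current (j + k) acc := by
  intro k
  induction k with
  | zero => intro fuel j current acc r _ _ _; simp
  | succ k ih =>
    intro fuel j current acc r hne hdrop hk
    cases fuel with
    | zero => omega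
    | succ f =>
      have hget : s[j]? = some current := by
        have := List.getElem?_drop (xs := s) (i := j) (j := 0)
        rw [hdrop] at this
        simpa using this.symm
      have hstep : s.drop (j + 1) = List.replicate k current ++ r := by
        have h1 : List.drop 1 (List.drop j s) = List.drop (j + 1) s := List.drop_drop
        rw [← h1, hdrop]
        simp [List.replicate_succ]
      rw [RopeCuttingLoop, if_neg hne, hget]
      dsimp only
      rw [if_neg (by omega : ¬ (current - current > 0))]
      rw [ih f (j + 1) current acc r hne hstep (by omega)]
      congr 1 <;> omega

-- A's loop, from a position below a sorted suffix r all of whose elements exceed current,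
-- produces exactly the emitSpec of r
theorem loop_emit (s : List Int) (n t : Int) (hs : s.Pairwise (· ≤ ·)) :
    ∀ (fuel : Nat) (r : List Int) (j : Nat) (current : Int) (acc : List Int),
      s.drop j = r → (∀ x ∈ r, current < x) → t ∈ r → current ≠ t → r.length ≤ fuel →
      RopeCuttingLoop s n t fuel current j acc = acc ++ emitSpec t n r (j : Int) := by
  intro fuel
  induction fuel using Nat.strong_induction_on with
  | _ fuel ih =>
    intro r j current acc hdrop hgt ht hne hlen
    rcases r with _ | ⟨u, r1⟩
    · simp at ht
    cases fuel with
    | zero => simp at hlen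
    | succ f =>
      have hget : s[j]? = some u := by
        have := List.getElem?_drop (xs := s) (i := j) (j := 0)
        rw [hdrop] at this
        simpa using this.symm
      have hcu : current < u := hgt u (by simp)
      have hdrop1 : s.drop (j + 1) = r1 := by
        have h1 : List.drop 1 (List.drop j s) = List.drop (j + 1) s := List.drop_drop
        rw [← h1, hdrop]
        simp
      have hr : (u :: r1).Pairwise (· ≤ ·) :=
        List.Pairwise.sublist (hdrop ▸ List.drop_sublist j s) hs
      have hle1 : ∀ x ∈ r1, u ≤ x := (List.pairwise_cons.mp hr).1
      rw [RopeCuttingLoop, if_neg hne, hget]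
      dsimp only
      rw [if_pos (by omega : u - current > 0)]
      by_cases hu : u = t
      · subst hu
        rw [loop_exit]
        simp [emitSpec]
      · set tw := r1.takeWhile (fun x => x == u) with htw
        set r2 := r1.dropWhile (fun x => x == u) with hr2
        set k := tw.length with hk
        have htwr : tw = List.replicate k u := takeWhile_beq_replicate u r1
        have hsplit1 : r1 = tw ++ r2 := (List.takeWhile_append_dropWhile).symm
        have hdropk : s.drop (j + 1) = List.replicate k u ++ r2 := by
          rw [hdrop1]
          conv_lhs => rw [hsplit1, htwr]
        have hlenk : k + r2.length = r1.length := by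
          conv_rhs => rw [hsplit1]
          simp [hk]
        have hskip := loop_skip s n t k f (j + 1) u (acc ++ [n - (j : Int)]) r2 hu hdropk
          (by simp at hlen; omega)
        have hdrop2 : s.drop (j + 1 + k) = r2 := by
          have h1 : List.drop k (List.drop (j + 1) s) = List.drop (j + 1 + k) s := List.drop_drop
          rw [← h1, hdrop1]
          conv_lhs => rw [hsplit1, htwr]
          simp
        have hgt2 : ∀ x ∈ r2, u < x :=
          gt_of_mem_dropWhile u r1 (List.pairwise_cons.mp hr).2 hle1
        have ht2 : t ∈ r2 := by
        -- t = u contradicts hu; otherwise t sits in r1 = tw ++ r2 but not in the u-block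
          rcases List.mem_cons.mp ht with h | h
          · exact absurd h.symm hu
          · rw [hsplit1] at h
            rcases List.mem_append.mp h with h | h
            · exact absurd ((List.mem_replicate.mp (by rwa [htwr] at h)).2).symm hu
            · exact h
        rw [hskip, ih (f - k) (by omega) r2 (j + 1 + k) u (acc ++ [n - (j : Int)])
          hdrop2 hgt2 ht2 hu (by simp at hlen; omega)]
        rw [emitSpec, if_neg hu, ← htw, ← hr2, ← hk]
        push_cast
        rw [List.append_assoc]
        norm_num

-- the fold in B is bemit
theorem bfold (s0 t n : Int) :
    ∀ (l : List (Int × Int)) (acc : List Int) (p : Int),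
      (l.foldl (fun (st : List Int × Int) vc =>
          (if vc.1 ≠ s0 ∧ vc.1 ≤ t then st.1 ++ [n - st.2] else st.1, st.2 + vc.2))
        (acc, p)).1 = acc ++ bemit s0 t n l p := by
  intro l
  induction l with
  | nil => intro acc p; simp [bemit]
  | cons vc l ih =>
    intro acc p
    rw [List.foldl_cons, bemit]
    by_cases h : vc.1 ≠ s0 ∧ vc.1 ≤ t
    · rw [if_pos h, if_pos h, ih]; simp
    · rw [if_neg h, if_neg h, ih]; simp

theorem bemit_nil (s0 t n : Int) :
    ∀ (l : List (Int × Int)) (p : Int), (∀ vc ∈ l, ¬ (vc.1 ≠ s0 ∧ vc.1 ≤ t)) →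
      bemit s0 t n l p = [] := by
  intro l
  induction l with
  | nil => intro p _; rfl
  | cons vc l ih =>
    intro p h
    rw [bemit, if_neg (h vc (by simp)), ih _ (fun vc hvc => h vc (by simp [hvc]))]
    rfl

-- the distinct elements of a sorted nonempty list: head, then the distinct elements past
-- the head's block
theorem ofList_sorted_group (u : Int) :
    ∀ (l : List Int), (∀ x ∈ l.dropWhile (fun x => x == u), u < x) →
      PySem.Set.ofList (u :: l) = u :: PySem.Set.ofList (l.dropWhile (fun x => x == u)) := by
  intro l
  induction l with
  | nil => intro _; rfl
  | cons h tl ih =>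
    intro hgt
    by_cases hh : h = u
    · subst hh
      have hdw : (h :: tl).dropWhile (fun x => x == h) = tl.dropWhile (fun x => x == h) := by
        simp
      rw [hdw] at hgt ⊢
      have ihh := ih hgt
      rw [PySem.Set.ofList_cons] at ihh ⊢
      have hdis : PySem.Set.discard (PySem.Set.ofList (h :: tl)) h
           = PySem.Set.discard (PySem.Set.ofList tl) h := by
        rw [PySem.Set.ofList_cons]
        simp [PySem.Set.discard, List.filter_filter]
      rw [hdis, (List.cons_eq_cons.mp ihh).2]
    · have hdw : (h :: tl).dropWhile (fun x => x == u) = h :: tl := by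
        simp [hh]
      rw [hdw] at hgt ⊢
      rw [PySem.Set.ofList_cons]
      congr 1
      have hne : ∀ x ∈ PySem.Set.ofList (h :: tl), x ≠ u := by
        intro x hx
        exact ne_of_gt (hgt x ((PySem.Set.mem_ofList _ _).mp hx))
      simp only [PySem.Set.discard]
      exact List.filter_eq_self.mpr (fun a ha => by simpa using hne a ha)

-- B's key scan over the distinct values of the sorted suffix r equals emitSpec of r
theorem bemit_emit (s : List Int) (s0 t n : Int) (hs : s.Pairwise (· ≤ ·)) :
    ∀ (m : Nat) (r pre : List Int), r.length = m →
      s = pre ++ r → (∀ x ∈ pre, ∀ y ∈ r, x < y) → s0 ∈ pre → t ∈ r →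
      bemit s0 t n ((PySem.Set.ofList r).map (fun v => (v, (s.count v : Int))))
          (pre.length : Int)
        = emitSpec t n r (pre.length : Int) := by
  intro m
  induction m using Nat.strong_induction_on with
  | _ m ih =>
    intro r pre hm hsplit hlt hs0 ht
    rcases r with _ | ⟨u, r1⟩
    · simp at ht
    set tw := r1.takeWhile (fun x => x == u) with htw
    set r2 := r1.dropWhile (fun x => x == u) with hr2
    set k := tw.length with hk
    have htwr : tw = List.replicate k u := takeWhile_beq_replicate u r1
    have hsplit1 : r1 = tw ++ r2 := (List.takeWhile_append_dropWhile).symm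
    have hr : (u :: r1).Pairwise (· ≤ ·) := by
      refine List.Pairwise.sublist ?_ hs
      rw [hsplit]; exact List.sublist_append_right pre _
    have hle1 : ∀ x ∈ r1, u ≤ x := (List.pairwise_cons.mp hr).1
    have hgt2 : ∀ x ∈ r2, u < x :=
      gt_of_mem_dropWhile u r1 (List.pairwise_cons.mp hr).2 hle1
    have hofl : PySem.Set.ofList (u :: r1) = u :: PySem.Set.ofList r2 :=
      ofList_sorted_group u r1 hgt2
    have hs0u : s0 < u := hlt s0 hs0 u (by simp)
    have hut : u ≤ t := by
      rcases List.mem_cons.mp ht with h | h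
      · omega
      · exact hle1 t h
    have hcount : s.count u = 1 + k := by
      have h1 : pre.count u = 0 :=
        List.count_eq_zero.mpr (fun hmem => absurd (hlt u hmem u (by simp)) (lt_irrefl u))
      have h2 : r2.count u = 0 :=
        List.count_eq_zero.mpr (fun hmem => absurd (hgt2 u hmem) (lt_irrefl u))
      have h3 : tw.count u = k := by rw [htwr]; simp
      rw [hsplit, List.count_append, h1]
      rw [show (u :: r1) = u :: (tw ++ r2) by rw [← hsplit1]]
      rw [List.count_cons_self, List.count_append, h2, h3]
      omega
    rw [hofl, List.map_cons, bemit]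
    dsimp only
    rw [if_pos ⟨ne_of_gt hs0u, hut⟩]
    rw [hcount]
    by_cases hu : u = t
    · subst hu
      rw [emitSpec, if_pos rfl]
      rw [bemit_nil]
      · rfl
      · rintro vc hvc
        rcases List.mem_map.mp hvc with ⟨v, hv, rfl⟩
        have : u < v := hgt2 v ((PySem.Set.mem_ofList _ _).mp hv)
        simp only [not_and]
        intro _
        omega
    · have hmlen : r2.length < m := by
        have : k + r2.length = r1.length := by
          conv_rhs => rw [hsplit1]; simp [hk]
        simp at hm
        omega
      have hsplit' : s = (pre ++ u :: tw) ++ r2 := by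
        rw [hsplit]
        conv_lhs => rw [hsplit1]
        simp
      have hlt' : ∀ x ∈ pre ++ u :: tw, ∀ y ∈ r2, x < y := by
        intro x hx y hy
        rcases List.mem_append.mp hx with hx | hx
        · refine hlt x hx y ?_
          rw [hsplit1]
          exact List.mem_cons_of_mem u (List.mem_append.mpr (Or.inr hy))
        · have hxu : x = u := by
            rcases List.mem_cons.mp hx with hx2 | hx2
            · exact hx2
            · exact (List.mem_replicate.mp (by rwa [htwr] at hx2)).2
          rw [hxu]
          exact hgt2 y hy
      have hs0' : s0 ∈ pre ++ u :: tw := List.mem_append.mpr (Or.inl hs0)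
      have ht' : t ∈ r2 := by
        rcases List.mem_cons.mp ht with h | h
        · exact absurd h.symm hu
        · rw [hsplit1] at h
          rcases List.mem_append.mp h with h | h
          · exact absurd ((List.mem_replicate.mp (by rwa [htwr] at h)).2).symm hu
          · exact h
      have hrec := ih r2.length hmlen r2 (pre ++ u :: tw) rfl hsplit' hlt' hs0' ht'
      rw [emitSpec, if_neg hu, ← htw, ← hr2, ← hk]
      have hplen : ((pre ++ u :: tw).length : Int) = (pre.length : Int) + 1 + k := by
        simp [List.length_append]
        omega
      rw [hplen] at hrec
      have harg : (pre.length : Int) + (((1 + k : Nat) : Int)) = (pre.length : Int) + 1 + (k : Int) := by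
        push_cast; ring
      rw [harg, hrec]
      rfl

-- glue: a pyGet? with an in-range (possibly negative) index returns an element of the list
theorem pyGet?_mem (s : List Int) (i : Int) (h1 : -(s.length : Int) ≤ i) (h2 : i < s.length) :
    ∃ v, PySem.List.pyGet? s i = some v ∧ v ∈ s := by
  unfold PySem.List.pyGet? PySem.List.pyIdx?
  by_cases h0 : 0 ≤ i
  · rw [if_pos h0, if_pos (by exact_mod_cast h2)]
    have hlt : i.toNat < s.length := by omega
    exact ⟨s[i.toNat], by simp [List.getElem?_eq_getElem hlt], List.getElem_mem _⟩
  · rw [if_neg h0, if_pos (by omega)]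
    have hlt : s.length - (-i).toNat < s.length := by omega
    exact ⟨s[s.length - (-i).toNat], by simp [List.getElem?_eq_getElem hlt], List.getElem_mem _⟩

theorem RopeCutting_main (arr : List Int) (n : Int) (hpre : Pre_RopeCutting arr n) :
    RopeCutting arr n = RopeCutting_alt arr n := by
  obtain ⟨hpre1, hpre2⟩ := hpre
  simp only [RopeCutting, RopeCutting_alt]
  set s := PySem.List.sorted arr (fun x => x) false with hsdef
  have hs : s.Pairwise (· ≤ ·) := PySem.List.sorted_pairwise arr (fun x => x)
  have hL : s.length = arr.length := PySem.List.length_sorted arr _ false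
  have hlen : 1 ≤ s.length := by omega
  obtain ⟨s0, stail, hcons⟩ : ∃ c0 tl, s = c0 :: tl := by
    cases hc : s with
    | nil => rw [hc] at hlen; simp at hlen
    | cons a l => exact ⟨a, l, rfl⟩
  have hget0 : PySem.List.pyGet? s 0 = some s0 := by
    rw [hcons]
    simp [PySem.List.pyGet?, PySem.List.pyIdx?]
  obtain ⟨tval, hgett, htmem⟩ := pyGet?_mem s (n - 1) (by omega) (by omega)
  rw [hget0, hgett]
  dsimp only
  rw [PySem.Dict.foldl_insert_getD_add_one_eq_counter, PySem.Dict.items_counter, bfold]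
  have hstail_pw : stail.Pairwise (· ≤ ·) := (List.pairwise_cons.mp (hcons ▸ hs)).2
  have hle : ∀ x ∈ stail, s0 ≤ x := (List.pairwise_cons.mp (hcons ▸ hs)).1
  set tw := stail.takeWhile (fun x => x == s0) with htw
  set r := stail.dropWhile (fun x => x == s0) with hr
  set k0 := tw.length with hk0
  have htwr : tw = List.replicate k0 s0 := takeWhile_beq_replicate s0 stail
  have hstail : stail = tw ++ r := (List.takeWhile_append_dropWhile).symm
  have hgtr : ∀ x ∈ r, s0 < x := gt_of_mem_dropWhile s0 stail hstail_pw hle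
  have hofl : PySem.Set.ofList s = s0 :: PySem.Set.ofList r := by
    rw [hcons]; exact ofList_sorted_group s0 stail hgtr
  have hrep : s = List.replicate (k0 + 1) s0 ++ r := by
    rw [hcons]
    conv_lhs => rw [hstail, htwr]
    simp [List.replicate_succ]
  have hcount : s.count s0 = 1 + k0 := by
    rw [hrep, List.count_append]
    have : r.count s0 = 0 :=
      List.count_eq_zero.mpr (fun hmem => absurd (hgtr s0 hmem) (lt_irrefl s0))
    simp [this]
    omega
  rw [hofl, List.map_cons, bemit]
  dsimp only
  rw [if_neg (by simp), hcount]
  by_cases hst : s0 = tval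
  · rw [← hst, loop_exit, bemit_nil _ _ _ _ _ (by
      rintro vc hvc
      rcases List.mem_map.mp hvc with ⟨v, hv, rfl⟩
      have hv' : s0 < v := hgtr v ((PySem.Set.mem_ofList _ _).mp hv)
      simp only [not_and]
      intro _
      omega)]
    simp
  · have hdropk : s.drop 0 = List.replicate (k0 + 1) s0 ++ r := by simpa using hrep
    have hlenS : s.length = k0 + 1 + r.length := by
      rw [hrep]; simp
    rw [loop_skip s n tval (k0 + 1) (s.length + 1) 0 s0 [] r hst hdropk (by omega)]
    have hdropr : s.drop (0 + (k0 + 1)) = r := by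
      conv_lhs => rw [hrep]
      simp
    have htr : tval ∈ r := by
      rw [hrep] at htmem
      rcases List.mem_append.mp htmem with h | h
      · exact absurd ((List.mem_replicate.mp h).2).symm hst
      · exact h
    rw [loop_emit s n tval hs (s.length + 1 - (k0 + 1)) r (0 + (k0 + 1)) s0 []
      hdropr hgtr htr hst (by omega)]
    have hbe := bemit_emit s s0 tval n hs r.length r (List.replicate (k0 + 1) s0) rfl hrep
      (fun x hx y hy => by rw [(List.mem_replicate.mp hx).2]; exact hgtr y hy)
      (List.mem_replicate.mpr ⟨Nat.succ_ne_zero k0, rfl⟩) htr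
    rw [List.length_replicate] at hbe
    have harg : (0 : Int) + ((1 + k0 : Nat) : Int) = ((k0 + 1 : Nat) : Int) := by
      push_cast
      ring
    rw [harg, hbe]
    simp

-- ===== VERDICT (by name: the statement is the Claim_ definition above) =====
theorem RopeCutting_spec : Claim_equal_RopeCutting := by
  intro arr n _ hpre
  exact RopeCutting_main arr n hpre
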